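-- pv_equiv track=rewrite | github.com/Patel-Suchi/PlayNineSolitaire | play_nine_player.py | choose_drawing_action
-- ===== SOURCE A (Python) =====
-- def choose_drawing_action(top_concealed, bottom_concealed, draws_left, kitty_card):
--     if kitty_card in top_concealed:
--         index = get_index(top_concealed, kitty_card)
--         for i in index:
--             if bottom_concealed[i] != kitty_card:
--                 action = "k"
--                 return action
--     if kitty_card in bottom_concealed:
--         index = get_index(bottom_concealed, kitty_card)
--         for i in index:
--             if top_concealed[i] != kitty_card:
--                 action = "k"
--                 return action
--
--     if kitty_card < 0:
--         action = "k"
--     elif draws_left < 3 and kitty_card == 0: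
--         action = "k"
--     else:
--         action = "d"
--     return action
--
-- def get_index(index_list, element):
--     index = []
--     for i in range(len(index_list)):
--         if index_list[i] == element:
--             index.append(i)
--     return index
-- ===== SOURCE B (Python) =====
-- def choose_drawing_action(top_concealed, bottom_concealed, draws_left, kitty_card):
--     for t, b in zip(top_concealed, bottom_concealed):
--         if (t == kitty_card) != (b == kitty_card):
--             return "k"
--     if kitty_card < 0:
--         return "k"
--     if draws_left < 3 and kitty_card == 0:
--         return "k"
--     return "d"
-- ===== Notes on version B (the rewrite author's own statement) =====
-- stated objective: simpler
-- what changed: B drops get_index and the two index-list-driven scans entirely and decides 'k' in one zip pass over the two hands, returning at the first position where exactly one hand equals kitty_card; the final kitty_card/draws_left block is kept.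
import Mathlib
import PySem

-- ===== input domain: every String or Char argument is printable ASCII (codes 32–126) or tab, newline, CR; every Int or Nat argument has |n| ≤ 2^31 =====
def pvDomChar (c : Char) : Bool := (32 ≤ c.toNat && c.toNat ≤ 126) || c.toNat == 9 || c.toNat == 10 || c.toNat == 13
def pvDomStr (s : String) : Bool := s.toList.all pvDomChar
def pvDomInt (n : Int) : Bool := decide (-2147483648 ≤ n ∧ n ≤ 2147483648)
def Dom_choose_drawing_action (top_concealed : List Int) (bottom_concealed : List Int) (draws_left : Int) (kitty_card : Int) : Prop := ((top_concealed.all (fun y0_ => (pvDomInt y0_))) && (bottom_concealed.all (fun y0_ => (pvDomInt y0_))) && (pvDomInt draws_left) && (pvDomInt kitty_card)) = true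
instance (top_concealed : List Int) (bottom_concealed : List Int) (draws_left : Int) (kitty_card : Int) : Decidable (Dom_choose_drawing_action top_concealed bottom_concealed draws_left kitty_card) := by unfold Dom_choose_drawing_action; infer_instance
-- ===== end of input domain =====

-- B replaces A's two membership tests + get_index index lists + two index-driven scans by one
-- zip pass that returns "k" at the first position where exactly one hand shows the kitty card
-- (objective: simpler; equivalence is about the return value only, neither program mutates its arguments).

-- ===== PORT A =====
-- get_index(index_list, element): indices (as Python ints) where the element occurs
def pvGetIndex (index_list : List Int) (element : Int) : List Int :=
  (PySem.List.pyRange 0 index_list.length 1).foldl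
    (fun acc i => if PySem.List.pyGet? index_list i = some element then acc ++ [i] else acc) []

-- outcome of one 'for i in index: if other[i] != kitty_card: return "k"' loop:
-- ret = returned "k", raised = IndexError on other[i], cont = fell through
inductive PvPhase | ret | raised | cont
deriving DecidableEq, Repr

def pvPhase (idx : List Int) (other : List Int) (k : Int) : PvPhase :=
  match idx with
  | [] => .cont
  | i :: rest =>
    match PySem.List.pyGet? other i with
    | none => .raised
    | some b => if b ≠ k then .ret else pvPhase rest other k

def choose_drawing_action (top_concealed : List Int) (bottom_concealed : List Int) (draws_left : Int) (kitty_card : Int) : String :=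
  match (if kitty_card ∈ top_concealed then pvPhase (pvGetIndex top_concealed kitty_card) bottom_concealed kitty_card else .cont) with
  | .ret => "k"
  | .raised => "IndexError"   -- Python raises here; excluded by Pre_
  | .cont =>
    match (if kitty_card ∈ bottom_concealed then pvPhase (pvGetIndex bottom_concealed kitty_card) top_concealed kitty_card else .cont) with
    | .ret => "k"
    | .raised => "IndexError" -- Python raises here; excluded by Pre_
    | .cont =>
      if kitty_card < 0 then "k"
      else if draws_left < 3 ∧ kitty_card = 0 then "k"
      else "d"

-- ===== PORT B =====
-- 'for t, b in zip(top, bottom): if (t == k) != (b == k): return "k"'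
def pvAnyXor (k : Int) : List Int → List Int → Bool
  | t :: ts, b :: bs => if ((t == k) != (b == k)) then true else pvAnyXor k ts bs
  | _, _ => false

def choose_drawing_action_alt (top_concealed : List Int) (bottom_concealed : List Int) (draws_left : Int) (kitty_card : Int) : String :=
  if pvAnyXor kitty_card top_concealed bottom_concealed then "k"
  else if kitty_card < 0 then "k"
  else if draws_left < 3 ∧ kitty_card = 0 then "k"
  else "d"

-- ===== PRECONDITION & SPEC =====
-- ∃ position (within both hands) where the first list shows k and the second does not
def pvMis (xs ys : List Int) (k : Int) : Prop := ∃ p ∈ xs.zip ys, p.1 = k ∧ p.2 ≠ k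

-- Pre_ excludes exactly the inputs on which Python A raises IndexError: kitty_card occurs in one
-- hand beyond the other hand's length while no earlier position lets the loop return first.
def Pre_choose_drawing_action (top_concealed : List Int) (bottom_concealed : List Int) (draws_left : Int) (kitty_card : Int) : Prop :=
  ¬ (kitty_card ∈ top_concealed.drop bottom_concealed.length ∧ ¬ pvMis top_concealed bottom_concealed kitty_card)
  ∧ ¬ (kitty_card ∈ bottom_concealed.drop top_concealed.length ∧ ¬ pvMis top_concealed bottom_concealed kitty_card ∧ ¬ pvMis bottom_concealed top_concealed kitty_card)

instance (top_concealed : List Int) (bottom_concealed : List Int) (draws_left : Int) (kitty_card : Int) : Decidable (Pre_choose_drawing_action top_concealed bottom_concealed draws_left kitty_card) := by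
  unfold Pre_choose_drawing_action pvMis; infer_instance

def pvWitness_choose_drawing_action : List Int × List Int × Int × Int := ([1, 5, 2], [5, 5, 3], 4, 5)

def Spec_choose_drawing_action (top_concealed : List Int) (bottom_concealed : List Int) (draws_left : Int) (kitty_card : Int) (out : String) : Prop := out = choose_drawing_action_alt top_concealed bottom_concealed draws_left kitty_card
instance (top_concealed : List Int) (bottom_concealed : List Int) (draws_left : Int) (kitty_card : Int) (out : String) : Decidable (Spec_choose_drawing_action top_concealed bottom_concealed draws_left kitty_card out) := by unfold Spec_choose_drawing_action; infer_instance

-- ===== CLAIM (what is proved, stated in full; the proofs are below) =====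
def Claim_equal_choose_drawing_action : Prop := ∀ (top_concealed : List Int) (bottom_concealed : List Int) (draws_left : Int) (kitty_card : Int), Dom_choose_drawing_action top_concealed bottom_concealed draws_left kitty_card → Pre_choose_drawing_action top_concealed bottom_concealed draws_left kitty_card → Spec_choose_drawing_action top_concealed bottom_concealed draws_left kitty_card (choose_drawing_action top_concealed bottom_concealed draws_left kitty_card)

-- ===== LEMMAS AND PROOFS =====

theorem pvGetBang (l : List Int) (n : Nat) (h : n < l.length) : l[n]! = l[n] := by
  simp [List.getElem!_eq_getElem?_getD, List.getElem?_eq_getElem h]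

theorem pvGetIndex_eq (l : List Int) (e : Int) :
    pvGetIndex l e = ((List.range l.length).map (fun n => Int.ofNat n)).filter
      (fun i => decide (PySem.List.pyGet? l i = some e)) := by
  rw [pvGetIndex, PySem.List.foldl_append_ite_eq_filter, PySem.List.pyRange_one]
  norm_num [Int.ofNat_eq_natCast]

theorem mem_pvGetIndex (l : List Int) (e : Int) (i : Int) :
    i ∈ pvGetIndex l e ↔ ∃ n, n < l.length ∧ l[n]! = e ∧ i = (n : Int) := by
  rw [pvGetIndex_eq, List.mem_filter, decide_eq_true_eq]
  constructor
  · rintro ⟨h1, hg⟩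
    obtain ⟨n, hn, rfl⟩ := List.mem_map.1 h1
    rw [List.mem_range] at hn
    rw [Int.ofNat_eq_natCast, PySem.List.pyGet?_natCast, List.getElem?_eq_getElem hn] at hg
    exact ⟨n, hn, by simpa [pvGetBang l n hn] using hg, rfl⟩
  · rintro ⟨n, hn, he, rfl⟩
    refine ⟨List.mem_map.2 ⟨n, List.mem_range.2 hn, rfl⟩, ?_⟩
    rw [PySem.List.pyGet?_natCast, List.getElem?_eq_getElem hn]
    simpa [pvGetBang l n hn] using he

theorem pvGetIndex_sorted (l : List Int) (e : Int) : (pvGetIndex l e).Pairwise (· < ·) := by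
  rw [pvGetIndex_eq]
  refine List.Pairwise.filter _ (List.pairwise_map.2 ?_)
  exact List.pairwise_lt_range.imp (by intro a b h; simpa [Int.ofNat_eq_natCast] using (Int.ofNat_lt.2 h))

-- a sorted nonnegative index loop that meets a readable mismatching entry returns "k"
theorem pvPhase_ret (idx other : List Int) (k : Int)
    (hnn : ∀ i ∈ idx, 0 ≤ i) (hs : idx.Pairwise (· < ·))
    (h : ∃ i ∈ idx, ∃ b, PySem.List.pyGet? other i = some b ∧ b ≠ k) :
    pvPhase idx other k = PvPhase.ret := by
  induction idx with
  | nil => simp at h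
  | cons i rest ih =>
    rcases h with ⟨j, hj, b, hb, hbk⟩
    cases hg : PySem.List.pyGet? other i with
    | none =>
      exfalso
      have hi0 : 0 ≤ i := hnn i (List.mem_cons_self ..)
      have hlen : (other.length : Int) ≤ i := by
        have := (PySem.List.pyGet?_eq_none_iff _ _).1 hg
        simp only [PySem.Raise.InRange] at this; omega
      rcases List.mem_cons.1 hj with rfl | hjr
      · rw [hg] at hb; cases hb
      · have hij : i < j := (List.pairwise_cons.1 hs).1 j hjr
        have hnone : PySem.List.pyGet? other j = none :=
          (PySem.List.pyGet?_eq_none_iff _ _).2 (by simp only [PySem.Raise.InRange]; omega)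
        rw [hnone] at hb; cases hb
    | some c =>
      by_cases hck : c = k
      · have hrec : pvPhase (i :: rest) other k = pvPhase rest other k := by
          simp [pvPhase, hg, hck]
        rw [hrec]
        apply ih (fun x hx => hnn x (List.mem_cons_of_mem _ hx)) (List.Pairwise.of_cons hs)
        rcases List.mem_cons.1 hj with rfl | hjr
        · rw [hg] at hb; injection hb with hb; exact absurd (hb.symm.trans hck) hbk
        · exact ⟨j, hjr, b, hb, hbk⟩
      · simp [pvPhase, hg, hck]

-- an index loop that only ever reads k falls through
theorem pvPhase_cont (idx other : List Int) (k : Int)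
    (h : ∀ i ∈ idx, PySem.List.pyGet? other i = some k) :
    pvPhase idx other k = PvPhase.cont := by
  induction idx with
  | nil => rfl
  | cons i rest ih =>
    simp only [pvPhase, h i (List.mem_cons_self ..)]
    simpa using ih (fun j hj => h j (List.mem_cons_of_mem _ hj))

theorem pvMis_iff (xs ys : List Int) (k : Int) :
    pvMis xs ys k ↔ ∃ n, n < xs.length ∧ n < ys.length ∧ xs[n]! = k ∧ ys[n]! ≠ k := by
  constructor
  · rintro ⟨p, hp, h1, h2⟩
    obtain ⟨n, hn, rfl⟩ := List.mem_iff_getElem.1 hp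
    rw [List.length_zip] at hn
    have hx : n < xs.length := by omega
    have hy : n < ys.length := by omega
    refine ⟨n, hx, hy, ?_, ?_⟩
    · rw [pvGetBang xs n hx]; simpa [List.getElem_zip] using h1
    · rw [pvGetBang ys n hy]; simpa [List.getElem_zip] using h2
  · rintro ⟨n, hx, hy, h1, h2⟩
    refine ⟨(xs[n], ys[n]), List.mem_iff_getElem.2 ⟨n, by simp [List.length_zip]; omega, by simp [List.getElem_zip]⟩, ?_, ?_⟩
    · simpa [pvGetBang xs n hx] using h1
    · simpa [pvGetBang ys n hy] using h2

theorem mem_drop_iff (xs : List Int) (m : Nat) (k : Int) :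
    k ∈ xs.drop m ↔ ∃ n, m ≤ n ∧ n < xs.length ∧ xs[n]! = k := by
  constructor
  · intro h
    obtain ⟨i, hi, hg⟩ := List.mem_iff_getElem.1 h
    have hlen : m + i < xs.length := by
      have := hi; rw [List.length_drop] at this; omega
    refine ⟨m + i, by omega, hlen, ?_⟩
    rw [pvGetBang xs _ hlen]
    rw [List.getElem_drop] at hg; exact hg
  · rintro ⟨n, hm, hn, hg⟩
    apply List.mem_iff_getElem.2
    refine ⟨n - m, by rw [List.length_drop]; omega, ?_⟩
    rw [List.getElem_drop, ← pvGetBang xs _ (by omega : m + (n - m) < xs.length)]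
    have : m + (n - m) = n := by omega
    rw [this]; exact hg

-- one whole phase of A returns "k" exactly on a mismatch
theorem phase_ret (top other : List Int) (k : Int) (h : pvMis top other k) :
    pvPhase (pvGetIndex top k) other k = PvPhase.ret := by
  obtain ⟨n, hx, hy, h1, h2⟩ := (pvMis_iff top other k).1 h
  apply pvPhase_ret
  · intro i hi; obtain ⟨m, _, _, rfl⟩ := (mem_pvGetIndex top k i).1 hi; positivity
  · exact pvGetIndex_sorted top k
  · refine ⟨(n : Int), (mem_pvGetIndex top k _).2 ⟨n, hx, h1, rfl⟩, other[n]!, ?_, h2⟩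
    rw [PySem.List.pyGet?_natCast, List.getElem?_eq_getElem hy, pvGetBang other n hy]

-- and falls through when there is no mismatch and no out-of-range occurrence
theorem phase_cont (top other : List Int) (k : Int)
    (hm : ¬ pvMis top other k) (ho : k ∉ top.drop other.length) :
    pvPhase (pvGetIndex top k) other k = PvPhase.cont := by
  apply pvPhase_cont
  intro i hi
  obtain ⟨n, hn, he, rfl⟩ := (mem_pvGetIndex top k i).1 hi
  have hy : n < other.length := by
    by_contra hge
    exact ho ((mem_drop_iff top other.length k).2 ⟨n, by omega, hn, he⟩)
  have heq : other[n]! = k := by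
    by_contra hne
    exact hm ((pvMis_iff top other k).2 ⟨n, hn, hy, he, hne⟩)
  rw [PySem.List.pyGet?_natCast, List.getElem?_eq_getElem hy, ← pvGetBang other n hy, heq]

theorem pvAnyXor_iff (top bottom : List Int) (k : Int) :
    pvAnyXor k top bottom = true ↔ pvMis top bottom k ∨ pvMis bottom top k := by
  induction top generalizing bottom with
  | nil => cases bottom <;> simp [pvAnyXor, pvMis]
  | cons t ts ih =>
    cases bottom with
    | nil => simp [pvAnyXor, pvMis]
    | cons b bs =>
      by_cases h1 : t = k <;> by_cases h2 : b = k <;>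
        simp [pvAnyXor, pvMis, List.zip_cons_cons, List.mem_cons, h1, h2, ih bs] <;>
        simp only [pvMis] at * <;> tauto

-- ===== VERDICT (by name: the statement is the Claim_ definition above) =====
theorem choose_drawing_action_spec : Claim_equal_choose_drawing_action := by
  intro top bottom d k _ hpre
  unfold Spec_choose_drawing_action choose_drawing_action choose_drawing_action_alt
  by_cases hP1 : pvMis top bottom k
  · have hmem : k ∈ top := by
      obtain ⟨p, hp, h1, _⟩ := hP1
      exact h1 ▸ (List.of_mem_zip hp).1
    rw [if_pos hmem, phase_ret top bottom k hP1,
        if_pos ((pvAnyXor_iff top bottom k).2 (Or.inl hP1))]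
  · have hph1 : (if k ∈ top then pvPhase (pvGetIndex top k) bottom k else .cont) = PvPhase.cont := by
      by_cases hmem : k ∈ top
      · rw [if_pos hmem]
        exact phase_cont top bottom k hP1 (fun hd => hpre.1 ⟨hd, hP1⟩)
      · rw [if_neg hmem]
    rw [hph1]
    by_cases hP2 : pvMis bottom top k
    · have hmem : k ∈ bottom := by
        obtain ⟨p, hp, h1, _⟩ := hP2
        exact h1 ▸ (List.of_mem_zip hp).1
      rw [if_pos hmem, phase_ret bottom top k hP2,
          if_pos ((pvAnyXor_iff top bottom k).2 (Or.inr hP2))]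
    · have hph2 : (if k ∈ bottom then pvPhase (pvGetIndex bottom k) top k else .cont) = PvPhase.cont := by
        by_cases hmem : k ∈ bottom
        · rw [if_pos hmem]
          exact phase_cont bottom top k hP2 (fun hd => hpre.2 ⟨hd, hP1, hP2⟩)
        · rw [if_neg hmem]
      have hax : ¬ (pvAnyXor k top bottom = true) := by
        rw [pvAnyXor_iff]; tauto
      rw [hph2, if_neg hax]
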